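-- pv_equiv track=rewrite | github.com/MichaelPGudz/Udemy_Course_Python_Z2H | 11 - Function Practice Exercises.py | summer_69
-- ===== SOURCE A (Python) =====
-- def summer_69(arr):
--     sum = 0
--     for i in range(len(arr)):
--         if arr[i] in [6,7,8,9]:
--            pass
--         elif arr[i] in []:
--             return 0
--         else:
--             sum += arr[i]
--     return sum
-- ===== SOURCE B (Python) =====
-- def summer_69(arr):
--     return sum(arr) - sum(x for x in arr if x in (6, 7, 8, 9))
-- ===== Notes on version B (the rewrite author's own statement) =====
-- stated objective: simpler
-- what changed: Replaces A's index-driven loop with dead branches (the unreachable 'in []' early return) by a total-minus-excluded decomposition: sum everything, subtract the sum of the 6/7/8/9 elements.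
import Mathlib
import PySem

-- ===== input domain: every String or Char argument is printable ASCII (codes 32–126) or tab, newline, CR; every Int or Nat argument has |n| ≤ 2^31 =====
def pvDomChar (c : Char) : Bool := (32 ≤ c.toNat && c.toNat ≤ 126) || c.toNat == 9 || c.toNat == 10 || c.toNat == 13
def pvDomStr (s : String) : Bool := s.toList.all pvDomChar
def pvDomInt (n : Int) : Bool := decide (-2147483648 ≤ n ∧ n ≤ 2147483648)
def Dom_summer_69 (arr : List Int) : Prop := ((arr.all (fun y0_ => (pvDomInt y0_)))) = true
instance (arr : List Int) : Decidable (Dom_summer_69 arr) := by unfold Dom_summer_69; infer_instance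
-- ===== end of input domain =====

-- B replaces A's index loop (with its unreachable 'in []' early return) by sum(arr) minus the sum
-- of the excluded 6/7/8/9 elements: a simpler total-then-complement decomposition, same O(n) cost.

-- ===== PORT A =====
-- for i in range(len(arr)): … with early return; recursion over the index list.
def summer69LoopA (arr : List Int) : List Int → Int → Int
  | [], s => s
  | i :: rest, s =>
    match PySem.List.pyGet? arr i with
    | none => 0  -- unreachable: i comes from range(len(arr)), so the index is in range
    | some x =>
      if x ∈ ([6, 7, 8, 9] : List Int) then summer69LoopA arr rest s
      else if x ∈ ([] : List Int) then 0
      else summer69LoopA arr rest (s + x)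

def summer_69 (arr : List Int) : Int :=
  summer69LoopA arr (PySem.List.pyRange 0 arr.length 1) 0

-- ===== PORT B =====
def summer_69_alt (arr : List Int) : Int :=
  arr.foldl (· + ·) 0 -
    (arr.filter (fun x => x ∈ ([6, 7, 8, 9] : List Int))).foldl (· + ·) 0

-- ===== PRECONDITION & SPEC =====
def Spec_summer_69 (arr : List Int) (out : Int) : Prop := out = summer_69_alt arr
instance (arr : List Int) (out : Int) : Decidable (Spec_summer_69 arr out) := by unfold Spec_summer_69; infer_instance

-- ===== CLAIM (what is proved, stated in full; the proofs are below) =====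
def Claim_equal_summer_69 : Prop := ∀ (arr : List Int), Dom_summer_69 arr → Spec_summer_69 arr (summer_69 arr)

-- ===== LEMMAS AND PROOFS =====

def pvKeepSum (l : List Int) : Int :=
  (l.filter (fun x => x ∉ ([6, 7, 8, 9] : List Int))).sum

theorem pvFoldlAdd (l : List Int) (s : Int) : l.foldl (· + ·) s = s + l.sum := by
  induction l generalizing s with
  | nil => simp
  | cons x xs ih =>
    rw [List.foldl_cons, ih (s + x), List.sum_cons]
    ring

theorem pvLoopA_suffix (post : List Int) : ∀ (pre : List Int) (s : Int),
    summer69LoopA (pre ++ post) (PySem.List.pyRange pre.length (pre ++ post).length 1) s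
      = s + pvKeepSum post := by
  induction post with
  | nil =>
    intro pre s
    rw [PySem.List.pyRange_one_eq_nil (by simp)]
    simp [summer69LoopA, pvKeepSum]
  | cons x xs ih =>
    intro pre s
    rw [PySem.List.pyRange_one_cons (by simp)]
    have hget : PySem.List.pyGet? (pre ++ (x :: xs)) (pre.length : Int) = some x := by
      simp [PySem.List.pyGet?, PySem.List.pyIdx?]
    have hpp : pre ++ x :: xs = (pre ++ [x]) ++ xs := by simp
    have hcast : ((pre.length : Int) + 1) = ((pre ++ [x]).length : Int) := by simp
    by_cases hx : x ∈ ([6, 7, 8, 9] : List Int)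
    · simp only [summer69LoopA, hget, if_pos hx]
      rw [hcast, hpp, ih (pre ++ [x]) s]
      simp only [pvKeepSum, List.filter_cons]
      rw [if_neg (by simp at hx ⊢; tauto)]
    · simp only [summer69LoopA, hget, if_neg hx, List.not_mem_nil, if_false]
      rw [hcast, hpp, ih (pre ++ [x]) (s + x)]
      simp only [pvKeepSum, List.filter_cons]
      rw [if_pos (by simp at hx ⊢; tauto)]
      simp only [List.sum_cons]
      ring

theorem pvA_eq_keep (arr : List Int) : summer_69 arr = pvKeepSum arr := by
  have h := pvLoopA_suffix arr [] 0
  simpa [summer_69] using h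

theorem pvB_eq_keep (arr : List Int) : summer_69_alt arr = pvKeepSum arr := by
  unfold summer_69_alt pvKeepSum
  rw [pvFoldlAdd, pvFoldlAdd]
  induction arr with
  | nil => simp
  | cons x xs ih =>
    simp only [List.filter_cons, List.sum_cons]
    by_cases hx : x ∈ ([6, 7, 8, 9] : List Int)
    · rw [if_pos (by simpa using hx), if_neg (by simp at hx ⊢; tauto)]
      simp only [List.sum_cons]
      omega
    · rw [if_neg (by simpa using hx), if_pos (by simp at hx ⊢; tauto)]
      simp only [List.sum_cons]
      omega

-- ===== VERDICT (by name: the statement is the Claim_ definition above) =====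
theorem summer_69_spec : Claim_equal_summer_69 := by
  intro arr _
  unfold Spec_summer_69
  rw [pvA_eq_keep, pvB_eq_keep]
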